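-- pv_equiv track=rewrite | github.com/pypi-data/pypi-mirror-396 | packages/spot-planner/spot_planner-0.3.3.tar.gz/spot_planner-0.3.3/debug_algorithm.py | is_valid_combination
-- ===== SOURCE A (Python) =====
-- def is_valid_combination(
--     combination,
--     min_consecutive_selections,
--     max_gap_between_periods,
--     max_gap_from_start,
--     full_length,
-- ):
--     if not combination:
--         return False
--
--     # Items are already sorted, so indices are in order
--     indices = [index for index, _ in combination]
--
--     # Check max_gap_from_start first (fastest check)
--     if indices[0] > max_gap_from_start:
--         return False
--
--     # Check start gap
--     if indices[0] > max_gap_between_periods: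
--         return False
--
--     # Check gaps between consecutive indices and min_consecutive_selections in single pass
--     block_length = 1
--     for i in range(1, len(indices)):
--         gap = indices[i] - indices[i - 1] - 1
--         if gap > max_gap_between_periods:
--             return False
--
--         if indices[i] == indices[i - 1] + 1:
--             block_length += 1
--         else:
--             if block_length < min_consecutive_selections:
--                 return False
--             block_length = 1
--
--     # Check last block min_consecutive_selections
--     if block_length < min_consecutive_selections:
--         return False
--
--     # Check end gap
--     if (full_length - 1 - indices[-1]) > max_gap_between_periods:
--         return False
--
--     return True
-- ===== SOURCE B (Python) =====
-- def is_valid_combination(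
--     combination,
--     min_consecutive_selections,
--     max_gap_between_periods,
--     max_gap_from_start,
--     full_length,
-- ):
--     indices = [index for index, _ in combination]
--     if not indices:
--         return False
--
--     # start gap must satisfy both limits
--     if indices[0] > max_gap_from_start or indices[0] > max_gap_between_periods:
--         return False
--
--     # every adjacent gap must be small enough
--     pairs = list(zip(indices, indices[1:]))
--     if any(b - a - 1 > max_gap_between_periods for a, b in pairs):
--         return False
--
--     # cut positions delimiting maximal consecutive runs; run lengths are cut differences
--     cuts = [0] + [k + 1 for k, (a, b) in enumerate(pairs) if b != a + 1] + [len(indices)]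
--     if min(b - a for a, b in zip(cuts, cuts[1:])) < min_consecutive_selections:
--         return False
--
--     # end gap
--     return full_length - 1 - indices[-1] <= max_gap_between_periods
-- ===== Notes on version B (the rewrite author's own statement) =====
-- stated objective: simpler
-- what changed: Replaces A's single interleaved early-return loop carrying a running block counter with a decomposition: one gap check over adjacent index pairs, then run lengths computed as differences of cut positions (where consecutiveness breaks), then a min comparison and the end-gap test.
import Mathlib
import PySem

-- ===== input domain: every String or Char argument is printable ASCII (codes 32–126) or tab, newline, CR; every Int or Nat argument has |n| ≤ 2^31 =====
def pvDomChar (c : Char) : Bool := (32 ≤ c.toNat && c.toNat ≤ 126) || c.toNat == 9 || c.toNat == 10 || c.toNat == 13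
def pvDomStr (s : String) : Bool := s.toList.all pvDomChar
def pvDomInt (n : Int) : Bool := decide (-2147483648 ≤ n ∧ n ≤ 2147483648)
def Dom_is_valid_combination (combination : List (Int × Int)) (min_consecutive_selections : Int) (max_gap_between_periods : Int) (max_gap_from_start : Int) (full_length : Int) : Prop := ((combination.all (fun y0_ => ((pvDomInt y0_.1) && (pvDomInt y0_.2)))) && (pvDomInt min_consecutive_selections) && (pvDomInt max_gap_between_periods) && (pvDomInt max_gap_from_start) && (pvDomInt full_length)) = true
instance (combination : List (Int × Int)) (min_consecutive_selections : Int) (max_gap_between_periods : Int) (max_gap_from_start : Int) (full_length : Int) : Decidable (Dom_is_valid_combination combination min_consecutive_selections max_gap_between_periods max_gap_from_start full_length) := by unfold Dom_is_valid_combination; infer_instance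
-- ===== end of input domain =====

-- ===== PORT A =====
-- B decomposes A's single interleaved validation loop into separate gap / run-length / end checks; simpler, same O(n) cost.

-- A's for-loop: early return (none) on a too-large gap or a too-short finished block,
-- otherwise carries block_length; returns the final block_length.
def pvLoopA (min_consec max_gap : Int) : Int → Int → List Int → Option Int
  | _, block, [] => some block
  | prev, block, x :: rest =>
    if x - prev - 1 > max_gap then none
    else if x = prev + 1 then pvLoopA min_consec max_gap x (block + 1) rest
    else if block < min_consec then none
    else pvLoopA min_consec max_gap x 1 rest

def is_valid_combination (combination : List (Int × Int)) (min_consecutive_selections : Int) (max_gap_between_periods : Int) (max_gap_from_start : Int) (full_length : Int) : Bool :=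
  -- `if not combination: return False` together with `indices = [index for index, _ in combination]`
  match combination.map Prod.fst with
  | [] => false
  | i0 :: rest =>
    if i0 > max_gap_from_start then false
    else if i0 > max_gap_between_periods then false
    else
      match pvLoopA min_consecutive_selections max_gap_between_periods i0 1 rest with
      | none => false
      | some block =>
        if block < min_consecutive_selections then false
        else if full_length - 1 - PySem.List.pyGetD (i0 :: rest) (-1) 0 > max_gap_between_periods then false
        else true

-- ===== PORT B =====
def is_valid_combination_alt (combination : List (Int × Int)) (min_consecutive_selections : Int) (max_gap_between_periods : Int) (max_gap_from_start : Int) (full_length : Int) : Bool :=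
  match combination.map Prod.fst with
  | [] => false
  | i0 :: rest =>
    if i0 > max_gap_from_start || i0 > max_gap_between_periods then false
    else
      let indices := i0 :: rest
      let pairs := indices.zip indices.tail
      if pairs.any (fun ab => ab.2 - ab.1 - 1 > max_gap_between_periods) then false
      else
        let cuts : List Int :=
          0 :: ((PySem.List.enumerate pairs 0).filterMap
                  (fun kab => if kab.2.2 ≠ kab.2.1 + 1 then some (kab.1 + 1) else none)
                ++ [(indices.length : Int)])
        let runlens := (cuts.zip cuts.tail).map (fun ab => ab.2 - ab.1)
        if (PySem.List.min? runlens (fun x => x)).getD 0 < min_consecutive_selections then false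
        else decide (full_length - 1 - PySem.List.pyGetD indices (-1) 0 ≤ max_gap_between_periods)

-- ===== PRECONDITION & SPEC =====
def Spec_is_valid_combination (combination : List (Int × Int)) (min_consecutive_selections : Int) (max_gap_between_periods : Int) (max_gap_from_start : Int) (full_length : Int) (out : Bool) : Prop := out = is_valid_combination_alt combination min_consecutive_selections max_gap_between_periods max_gap_from_start full_length
instance (combination : List (Int × Int)) (min_consecutive_selections : Int) (max_gap_between_periods : Int) (max_gap_from_start : Int) (full_length : Int) (out : Bool) : Decidable (Spec_is_valid_combination combination min_consecutive_selections max_gap_between_periods max_gap_from_start full_length out) := by unfold Spec_is_valid_combination; infer_instance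

-- ===== CLAIM (what is proved, stated in full; the proofs are below) =====
def Claim_equal_is_valid_combination : Prop := ∀ (combination : List (Int × Int)) (min_consecutive_selections : Int) (max_gap_between_periods : Int) (max_gap_from_start : Int) (full_length : Int), Dom_is_valid_combination combination min_consecutive_selections max_gap_between_periods max_gap_from_start full_length → Spec_is_valid_combination combination min_consecutive_selections max_gap_between_periods max_gap_from_start full_length (is_valid_combination combination min_consecutive_selections max_gap_between_periods max_gap_from_start full_length)

-- ===== LEMMAS AND PROOFS =====

-- common reference form: the adjacent-gap check as a recursion
def pvGapsOK (maxg : Int) : Int → List Int → Bool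
  | _, [] => true
  | prev, x :: rest => (!decide (x - prev - 1 > maxg)) && pvGapsOK maxg x rest

-- common reference form: the list of maximal-consecutive-run lengths, first run already holding `len`
def pvRlens : Int → Int → List Int → List Int
  | _, len, [] => [len]
  | prev, len, x :: rest => if x = prev + 1 then pvRlens x (len + 1) rest else len :: pvRlens x 1 rest

-- the difference list B takes a minimum over (proof-side abbreviation)
def pvDiffs (l : List Int) : List Int := (l.zip l.tail).map (fun ab => ab.2 - ab.1)

lemma pvRlens_ne_nil (rest : List Int) : ∀ (prev len : Int), pvRlens prev len rest ≠ [] := by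
  induction rest with
  | nil => intro prev len; simp [pvRlens]
  | cons x r ih => intro prev len; simp only [pvRlens]; split <;> simp [ih]

-- A's loop plus the trailing block check equals gap-check AND all-runs-long-enough
lemma loopA_char (minc maxg : Int) (rest : List Int) : ∀ (prev block : Int),
    (match pvLoopA minc maxg prev block rest with
     | none => false
     | some b => !decide (b < minc))
    = (pvGapsOK maxg prev rest && (pvRlens prev block rest).all (fun l => !decide (l < minc))) := by
  induction rest with
  | nil => intro prev block; simp [pvLoopA, pvGapsOK, pvRlens]
  | cons x r ih =>
    intro prev block
    simp only [pvLoopA, pvGapsOK, pvRlens]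
    by_cases hg : x - prev - 1 > maxg
    · rw [if_pos hg]
      simp [hg]
    · rw [if_neg hg]
      by_cases hc : x = prev + 1
      · rw [if_pos hc, if_pos hc, ih x (block + 1)]
        simp [hg]
      · rw [if_neg hc, if_neg hc]
        by_cases hb : block < minc
        · rw [if_pos hb]
          simp [hg, hb]
        · rw [if_neg hb, ih x 1]
          simp [hg, hb]

-- B's any-gap test equals the negation of the recursive gap check
lemma anyGap_char (maxg : Int) (rest : List Int) : ∀ (i0 : Int),
    ((i0 :: rest).zip rest).any (fun ab => ab.2 - ab.1 - 1 > maxg) = !pvGapsOK maxg i0 rest := by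
  induction rest with
  | nil => intro i0; simp [pvGapsOK]
  | cons x r ih => intro i0; simp [pvGapsOK, ih x, Bool.or_comm]

-- B's cut-difference list equals the recursive run-length list (generalised over the
-- enumerate offset s and the pending left cut c0)
lemma cuts_char (rest : List Int) : ∀ (prev s c0 : Int),
    pvDiffs (c0 :: ((PySem.List.enumerate ((prev :: rest).zip rest) s).filterMap
                      (fun kab => if kab.2.2 ≠ kab.2.1 + 1 then some (kab.1 + 1) else none)
                    ++ [s + (rest.length : Int) + 1]))
    = pvRlens prev (s + 1 - c0) rest := by
  induction rest with
  | nil => intro prev s c0; simp [PySem.List.enumerate_nil, pvDiffs, pvRlens]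
  | cons x r ih =>
    intro prev s c0
    simp only [List.zip_cons_cons, PySem.List.enumerate_cons, List.filterMap_cons]
    have harith : (s + (((x :: r).length : Nat) : Int) + 1) = (s + 1) + ((r.length : Nat) : Int) + 1 := by
      push_cast [List.length_cons]; ring
    by_cases hc : x = prev + 1
    · rw [if_neg (by simp [hc]), harith, ih x (s + 1) c0]
      have h2 : (s + 1 + 1 - c0) = (s + 1 - c0) + 1 := by ring
      simp [pvRlens, hc, h2]
    · rw [if_pos (by simp [hc]), harith, List.cons_append]
      have hstep : pvDiffs (c0 :: (s + 1) :: ((PySem.List.enumerate ((x :: r).zip r) (s + 1)).filterMap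
                      (fun kab => if kab.2.2 ≠ kab.2.1 + 1 then some (kab.1 + 1) else none)
                    ++ [(s + 1) + ((r.length : Nat) : Int) + 1]))
          = (s + 1 - c0) :: pvDiffs ((s + 1) :: ((PySem.List.enumerate ((x :: r).zip r) (s + 1)).filterMap
                      (fun kab => if kab.2.2 ≠ kab.2.1 + 1 then some (kab.1 + 1) else none)
                    ++ [(s + 1) + ((r.length : Nat) : Int) + 1])) := rfl
      rw [hstep, ih x (s + 1) (s + 1)]
      have h1 : (s + 1 + 1 - (s + 1)) = (1 : Int) := by ring
      simp [pvRlens, hc, h1]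

-- min(nonempty list) < m  iff  some element is below m
lemma min_getD_lt (l : List Int) (hl : l ≠ []) (m : Int) :
    ((PySem.List.min? l (fun x => x)).getD 0 < m) ↔ ¬ (l.all (fun x => !decide (x < m)) = true) := by
  cases h : PySem.List.min? l (fun x => x) with
  | none => exact absurd ((PySem.List.min?_eq_none_iff _ _).mp h) hl
  | some mn =>
    have hmem := PySem.List.min?_mem h
    have hmin := PySem.List.min?_isMin h
    simp only [Option.getD_some, List.all_eq_true, Bool.not_eq_true', decide_eq_false_iff_not, not_lt]
    constructor
    · intro hlt hall
      exact absurd (hall mn hmem) (not_le.mpr hlt)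
    · intro hnall
      rw [not_forall] at hnall
      obtain ⟨x, hx⟩ := hnall
      rw [Classical.not_imp, not_le] at hx
      exact lt_of_le_of_lt (hmin x hx.1) hx.2

-- ===== VERDICT (by name: the statement is the Claim_ definition above) =====
theorem is_valid_combination_spec : Claim_equal_is_valid_combination := by
  intro comb minc maxg mgs fl _
  unfold Spec_is_valid_combination is_valid_combination is_valid_combination_alt
  cases comb with
  | nil => simp
  | cons c cs =>
    simp only [List.map_cons, List.tail_cons]
    generalize cs.map Prod.fst = rest
    by_cases h1 : c.1 > mgs
    · rw [if_pos h1, if_pos (show (decide (c.1 > mgs) || decide (c.1 > maxg)) = true by simp [h1])]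
    · by_cases h2 : c.1 > maxg
      · rw [if_neg h1, if_pos h2,
            if_pos (show (decide (c.1 > mgs) || decide (c.1 > maxg)) = true by simp [h2])]
      · rw [if_neg h1, if_neg h2,
            if_neg (show ¬ (decide (c.1 > mgs) || decide (c.1 > maxg)) = true by simp [h1, h2])]
        have hA : (match pvLoopA minc maxg c.1 1 rest with
                   | none => false
                   | some block =>
                     if block < minc then false
                     else if fl - 1 - PySem.List.pyGetD (c.1 :: rest) (-1) 0 > maxg then false
                     else true)
                = ((match pvLoopA minc maxg c.1 1 rest with
                    | none => false
                    | some b => !decide (b < minc))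
                   && decide (fl - 1 - PySem.List.pyGetD (c.1 :: rest) (-1) 0 ≤ maxg)) := by
          cases pvLoopA minc maxg c.1 1 rest with
          | none => simp
          | some b =>
            by_cases hb : b < minc
            · simp [hb]
            · by_cases he : fl - 1 - PySem.List.pyGetD (c.1 :: rest) (-1) 0 > maxg
              · simp [hb, he, not_le.mpr he]
              · simp [hb, he, le_of_not_gt he]
        rw [hA, loopA_char, anyGap_char]
        have hlen : (((c.1 :: rest).length : Nat) : Int) = 0 + ((rest.length : Nat) : Int) + 1 := by
          push_cast [List.length_cons]; ring
        rw [hlen]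
        have hcuts := cuts_char rest c.1 0 0
        simp only [pvDiffs, List.tail_cons] at hcuts
        simp only [hcuts]
        have h10 : (0 + 1 - 0 : Int) = (1 : Int) := by ring
        rw [h10]
        by_cases hg : pvGapsOK maxg c.1 rest = true
        · rw [hg, if_neg (by simp)]
          by_cases hall : (pvRlens c.1 1 rest).all (fun l => !decide (l < minc)) = true
          · rw [if_neg (by rw [min_getD_lt _ (pvRlens_ne_nil rest c.1 1) minc]; simp [hall]),
                hall]
            simp
          · rw [if_pos ((min_getD_lt _ (pvRlens_ne_nil rest c.1 1) minc).mpr hall)]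
            simp at hall
            simp [hall]
        · simp only [Bool.not_eq_true] at hg
          rw [hg, if_pos (by simp)]
          simp
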